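-- pv_equiv track=rewrite | github.com/jmonclard/MopScreens | LoRa/sendpunch.py | computeCRC53
-- ===== SOURCE A (Python) =====
-- def computeCRC53(u0, u1, u2, u3, u4):
--     """
--     Calcul d'un CRC16 bits
--     Les variables sont 'arrondies' avec %=10000 pour simuler le fonctionnement des unsigned short du C
--     :param u0:
--     :param u1:
--     :param u2:
--     :param u3:
--     :param u4:
--     :return:
--     """
--     tmp = u0
--     bs = [u1, u2, u3, u4, 0] # attention, il y a une valeur en plus à 0
--     for val in bs:
--         for j in range(16):
--             if tmp & (1 << 15):
--                 tmp *= 2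
--                 if val & (1 << 15):
--                     tmp += 1
--                 tmp ^= 0x8005
--                 tmp %= 0x10000
--             else:
--                 tmp *= 2
--                 if val & (1 << 15):
--                     tmp += 1
--                 tmp %= 0x10000
--             val *= 2
--             val %= 0x10000
--     return tmp
-- ===== SOURCE B (Python) =====
-- def _crc16_table():
--     table = []
--     for b in range(256):
--         c = b << 8
--         for _ in range(8):
--             if c & 0x8000:
--                 c = ((c << 1) ^ 0x8005) & 0xFFFF
--             else:
--                 c = (c << 1) & 0xFFFF
--         table.append(c)
--     return table
--
-- _CRC16_TABLE = _crc16_table()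
--
-- def computeCRC53(u0, u1, u2, u3, u4):
--     crc = u0 & 0xFFFF
--     for v in (u1, u2, u3, u4, 0):
--         v &= 0xFFFF
--         for byte in (v >> 8, v & 0xFF):
--             crc = ((crc << 8) & 0xFFFF) ^ _CRC16_TABLE[crc >> 8] ^ byte
--     return crc
-- ===== Notes on version B (the rewrite author's own statement) =====
-- stated objective: alternative
-- what changed: Replaces the 80-iteration bit-serial CRC loop by a precomputed 256-entry CRC16 table and ten byte-wise steps (crc = ((crc<<8)&0xFFFF) ^ table[crc>>8] ^ byte), processing each word as two bytes.
import Mathlib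
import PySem

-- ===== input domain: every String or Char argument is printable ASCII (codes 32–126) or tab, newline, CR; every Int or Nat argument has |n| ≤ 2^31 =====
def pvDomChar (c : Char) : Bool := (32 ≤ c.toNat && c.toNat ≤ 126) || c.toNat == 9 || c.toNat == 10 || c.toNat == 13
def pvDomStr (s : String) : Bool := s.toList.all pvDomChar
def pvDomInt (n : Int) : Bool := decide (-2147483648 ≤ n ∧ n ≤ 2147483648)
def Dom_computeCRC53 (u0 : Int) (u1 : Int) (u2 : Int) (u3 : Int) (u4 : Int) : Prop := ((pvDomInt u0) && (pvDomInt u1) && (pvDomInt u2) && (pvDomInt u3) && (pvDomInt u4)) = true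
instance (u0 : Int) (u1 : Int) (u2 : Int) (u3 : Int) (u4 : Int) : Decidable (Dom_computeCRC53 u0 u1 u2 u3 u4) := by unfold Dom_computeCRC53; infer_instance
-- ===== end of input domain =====

-- B replaces A's 80-iteration bit-serial CRC16 loop by a precomputed 256-entry table
-- and ten byte-wise steps (objective: alternative algorithm; same exact result).

-- ===== PORT A =====
-- one iteration of A's inner `for j in range(16)` body, on the state (tmp, val)
def crcStep (s : Int × Int) : Int × Int :=
  let tmp := s.1
  let val := s.2
  let tmp :=
    if PySem.Int.band tmp (1 <<< (15 : Nat)) ≠ 0 then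
      let t := tmp * 2
      let t := if PySem.Int.band val (1 <<< (15 : Nat)) ≠ 0 then t + 1 else t
      PySem.Int.mod (PySem.Int.bxor t 0x8005) 0x10000
    else
      let t := tmp * 2
      let t := if PySem.Int.band val (1 <<< (15 : Nat)) ≠ 0 then t + 1 else t
      PySem.Int.mod t 0x10000
  (tmp, PySem.Int.mod (val * 2) 0x10000)

def computeCRC53 (u0 : Int) (u1 : Int) (u2 : Int) (u3 : Int) (u4 : Int) : Int :=
  ([u1, u2, u3, u4, 0] : List Int).foldl
    (fun tmp val =>
      ((PySem.List.pyRange 0 16 1).foldl (fun s _ => crcStep s) (tmp, val)).1) u0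

-- ===== PORT B =====
-- _crc16_table(): 256 entries, each the result of 8 bit-steps started from b << 8
def crc16Table : List Int :=
  (PySem.List.pyRange 0 256 1).foldl
    (fun table b =>
      table ++ [(PySem.List.pyRange 0 8 1).foldl
        (fun c _ =>
          if PySem.Int.band c 0x8000 ≠ 0 then
            PySem.Int.band (PySem.Int.bxor (c <<< (1 : Nat)) 0x8005) 0xFFFF
          else
            PySem.Int.band (c <<< (1 : Nat)) 0xFFFF)
        ((b : Int) <<< (8 : Nat))]) ([] : List Int)

def computeCRC53_alt (u0 : Int) (u1 : Int) (u2 : Int) (u3 : Int) (u4 : Int) : Int :=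
  ([u1, u2, u3, u4, 0] : List Int).foldl
    (fun crc v =>
      let v := PySem.Int.band v 0xFFFF
      ([v >>> (8 : Nat), PySem.Int.band v 0xFF] : List Int).foldl
        (fun crc byte =>
          PySem.Int.bxor
            (PySem.Int.bxor (PySem.Int.band (crc <<< (8 : Nat)) 0xFFFF)
              (PySem.List.pyGetD crc16Table (crc >>> (8 : Nat)) 0))
            byte) crc)
    (PySem.Int.band u0 0xFFFF)

-- ===== PRECONDITION & SPEC =====
def Spec_computeCRC53 (u0 : Int) (u1 : Int) (u2 : Int) (u3 : Int) (u4 : Int) (out : Int) : Prop := out = computeCRC53_alt u0 u1 u2 u3 u4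
instance (u0 : Int) (u1 : Int) (u2 : Int) (u3 : Int) (u4 : Int) (out : Int) : Decidable (Spec_computeCRC53 u0 u1 u2 u3 u4 out) := by unfold Spec_computeCRC53; infer_instance

-- ===== CLAIM (what is proved, stated in full; the proofs are below) =====
def Claim_equal_computeCRC53 : Prop := ∀ (u0 : Int) (u1 : Int) (u2 : Int) (u3 : Int) (u4 : Int), Dom_computeCRC53 u0 u1 u2 u3 u4 → Spec_computeCRC53 u0 u1 u2 u3 u4 (computeCRC53 u0 u1 u2 u3 u4)

-- ===== LEMMAS AND PROOFS =====

-- ---- proof-layer Nat model: one CRC bit-step written in GF(2)-linear form ----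
def lstep (t b : Nat) : Nat := ((2 * t) % 65536) ^^^ (if t.testBit 15 then 32773 else 0) ^^^ b

def pstep (s : Nat × Nat) : Nat × Nat :=
  (lstep s.1 (if s.2.testBit 15 then 1 else 0), (2 * s.2) % 65536)

def nEntry (h : Nat) : Nat := (fun c => lstep c 0)^[8] (h <<< 8)

def nByte (c b : Nat) : Nat := ((c <<< 8) % 65536) ^^^ nEntry (c >>> 8) ^^^ b

def nWord (t v : Nat) : Nat := (pstep^[16] (t, v)).1

def natA (r0 r1 r2 r3 r4 : Nat) : Nat := ([r1, r2, r3, r4, 0] : List Nat).foldl nWord r0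

def natB (r0 r1 r2 r3 r4 : Nat) : Nat :=
  ([r1, r2, r3, r4, 0] : List Nat).foldl (fun c v => nByte (nByte c (v >>> 8)) (v &&& 255)) r0

-- B's branchy table-builder step, Nat level
def bnstep (c : Nat) : Nat :=
  if c &&& 32768 ≠ 0 then ((c <<< 1) ^^^ 32773) &&& 65535 else (c <<< 1) &&& 65535

-- ---- generic Nat bit lemmas ----
lemma mask16 (x : Nat) : x &&& 65535 = x % 65536 := by
  have h := Nat.and_two_pow_sub_one_eq_mod x 16
  norm_num at h
  exact h

lemma mask8 (x : Nat) : x &&& 255 = x % 256 := by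
  have h := Nat.and_two_pow_sub_one_eq_mod x 8
  norm_num at h
  exact h

lemma xmod16 (x d : Nat) (hd : d < 65536) : (x ^^^ d) % 65536 = x % 65536 ^^^ d := by
  rw [← mask16, ← mask16, Nat.and_xor_distrib_right, mask16 d, Nat.mod_eq_of_lt hd]

lemma xor_two_decomp (a c b d : Nat) (hb : b < 2) (hd : d < 2) :
    (2 * a + b) ^^^ (2 * c + d) = 2 * (a ^^^ c) + (b ^^^ d) := by
  interval_cases b <;> interval_cases d
  · simpa [Nat.bit, two_mul] using Nat.xor_bit false a false c
  · simpa [Nat.bit, two_mul] using Nat.xor_bit false a true c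
  · simpa [Nat.bit, two_mul] using Nat.xor_bit true a false c
  · simpa [Nat.bit, two_mul] using Nat.xor_bit true a true c

lemma compl_two_pow (n : Nat) : ∀ r, r < 2 ^ n → r ^^^ (2 ^ n - 1) = 2 ^ n - 1 - r := by
  induction n with
  | zero => intro r hr; interval_cases r; decide
  | succ n ih =>
    intro r hr
    have h2 : (0:Nat) < 2 ^ n := Nat.two_pow_pos n
    have hd : 2 ^ (n+1) - 1 = 2 * (2 ^ n - 1) + 1 := by rw [pow_succ]; omega
    have hr2 : r = 2 * (r / 2) + r % 2 := by omega
    have hq : r / 2 < 2 ^ n := by rw [pow_succ] at hr; omega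
    calc r ^^^ (2 ^ (n+1) - 1) = (2 * (r/2) + r % 2) ^^^ (2 * (2 ^ n - 1) + 1) := by
            rw [← hr2, ← hd]
      _ = 2 * ((r/2) ^^^ (2 ^ n - 1)) + (r % 2 ^^^ 1) := by
            exact xor_two_decomp _ _ _ _ (by omega) (by omega)
      _ = 2 * (2 ^ n - 1 - r/2) + (r % 2 ^^^ 1) := by rw [ih _ hq]
      _ = 2 ^ (n+1) - 1 - r := by
            have : r % 2 ^^^ 1 = 1 - r % 2 := by
              rcases Nat.mod_two_eq_zero_or_one r with h | h <;> rw [h] <;> decide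
            rw [this, pow_succ] at *; omega

lemma compl16 (r : Nat) (h : r < 65536) : r ^^^ 65535 = 65535 - r := by
  have h2 := compl_two_pow 16 r (by norm_num; omega)
  norm_num at h2
  exact h2

lemma xor_low_pow (n : Nat) : ∀ a b, b < 2 ^ n → (a * 2 ^ n) ^^^ b = a * 2 ^ n + b := by
  induction n with
  | zero => intro a b hb; interval_cases b; simp
  | succ n ih =>
    intro a b hb
    have hq : b / 2 < 2 ^ n := by rw [pow_succ] at hb; omega
    have hb2 : b = 2 * (b / 2) + b % 2 := by omega
    calc (a * 2 ^ (n+1)) ^^^ b = (2 * (a * 2 ^ n) + 0) ^^^ (2 * (b/2) + b % 2) := by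
            rw [← hb2, pow_succ]; ring_nf
      _ = 2 * ((a * 2 ^ n) ^^^ (b/2)) + (0 ^^^ b % 2) := by
            exact xor_two_decomp _ _ _ _ (by omega) (by omega)
      _ = 2 * (a * 2 ^ n + b/2) + b % 2 := by rw [ih _ _ hq]; simp
      _ = a * 2 ^ (n+1) + b := by rw [pow_succ, ← mul_assoc]; omega

lemma testBit15_iff (r : Nat) (h : r < 65536) : r.testBit 15 = true ↔ 32768 ≤ r := by
  rw [Nat.testBit_eq_decide_div_mod_eq]
  norm_num
  omega

lemma xlt16 {a b : Nat} (ha : a < 65536) (hb : b < 65536) : a ^^^ b < 65536 := by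
  have h := Nat.xor_lt_two_pow (x := a) (y := b) (n := 16) (by norm_num; omega) (by norm_num; omega)
  norm_num at h
  exact h

-- ---- Int → Nat bridges for the Python bit operations ----
lemma band_mask16 (x : Int) : PySem.Int.band x 65535 = (((x % 65536).toNat : Nat) : Int) := by
  rcases le_or_gt 0 x with hx | hx
  · rw [PySem.Int.band_of_nonneg hx (by norm_num)]
    rw [show ((65535 : Int)).toNat = 65535 from rfl, mask16]
    omega
  · unfold PySem.Int.band
    rw [if_neg (by omega), if_pos (by norm_num)]
    rw [show ((65535 : Int)).toNat = 65535 from rfl, Nat.and_comm, mask16]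
    omega

lemma band_bit15 (x : Int) : (PySem.Int.band x 32768 ≠ 0) ↔ 32768 ≤ x % 65536 := by
  rcases le_or_gt 0 x with hx | hx
  · rw [PySem.Int.band_of_nonneg hx (by norm_num)]
    have hand := Nat.and_two_pow x.toNat 15
    rw [show (2:Nat) ^ 15 = 32768 from by norm_num] at hand
    rw [show ((32768 : Int)).toNat = 32768 from rfl, hand]
    cases h : x.toNat.testBit 15 <;>
      rw [Nat.testBit_eq_decide_div_mod_eq] at h <;> norm_num at h ⊢ <;> omega
  · unfold PySem.Int.band
    rw [if_neg (by omega), if_pos (by norm_num)]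
    have hand := Nat.and_two_pow (-x - 1).toNat 15
    rw [show (2:Nat) ^ 15 = 32768 from by norm_num] at hand
    rw [show ((32768 : Int)).toNat = 32768 from rfl, Nat.and_comm, hand]
    cases h : (-x - 1).toNat.testBit 15 <;>
      rw [Nat.testBit_eq_decide_div_mod_eq] at h <;> norm_num at h ⊢ <;> omega

lemma bxor_mod16 (x : Int) (d : Nat) (hd : d < 65536) :
    (PySem.Int.bxor x (d : Int)) % 65536 = ((((x % 65536).toNat ^^^ d) % 65536 : Nat) : Int) := by
  rcases le_or_gt 0 x with hx | hx
  · rw [PySem.Int.bxor_of_nonneg hx (by omega)]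
    rw [show ((d : Int)).toNat = d from by omega]
    have hN : (x.toNat ^^^ d) % 65536 = ((x % 65536).toNat ^^^ d) % 65536 := by
      rw [xmod16 _ _ hd, xmod16 _ _ hd]
      congr 1
      omega
    omega
  · unfold PySem.Int.bxor
    rw [if_neg (by omega), if_pos (by omega)]
    rw [show ((d : Int)).toNat = d from by omega]
    have hr : (-x - 1).toNat % 65536 < 65536 := Nat.mod_lt _ (by norm_num)
    have hxm : (x % 65536).toNat = 65535 - (-x - 1).toNat % 65536 := by omega
    rw [hxm]
    have h1 : ((-x - 1).toNat ^^^ d) % 65536 = (-x - 1).toNat % 65536 ^^^ d := xmod16 _ d hd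
    have h2 : ((65535 - (-x - 1).toNat % 65536) ^^^ d) % 65536
        = (65535 - (-x - 1).toNat % 65536) ^^^ d :=
      Nat.mod_eq_of_lt (xlt16 (by omega) hd)
    have h3 : (65535 - (-x - 1).toNat % 65536) ^^^ d
        = 65535 - ((-x - 1).toNat % 65536 ^^^ d) := by
      rw [← compl16 _ hr, Nat.xor_assoc, Nat.xor_comm 65535 d, ← Nat.xor_assoc,
        compl16 _ (xlt16 hr hd)]
    rw [h2, h3, ← h1]
    omega

-- ---- bounds ----
lemma lstep_lt (t b : Nat) (hb : b < 65536) : lstep t b < 65536 := by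
  unfold lstep
  exact xlt16 (xlt16 (Nat.mod_lt _ (by norm_num)) (by split_ifs <;> norm_num)) hb

lemma pstep_lt (s : Nat × Nat) : (pstep s).1 < 65536 ∧ (pstep s).2 < 65536 := by
  exact ⟨lstep_lt _ _ (by split_ifs <;> norm_num), Nat.mod_lt _ (by norm_num)⟩

lemma nEntry_lt (h : Nat) : nEntry h < 65536 := by
  unfold nEntry
  rw [show (8 : Nat) = 7 + 1 from rfl, Function.iterate_succ_apply']
  exact lstep_lt _ _ (by norm_num)

lemma nByte_lt (c b : Nat) (hb : b < 65536) : nByte c b < 65536 := by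
  unfold nByte
  exact xlt16 (xlt16 (Nat.mod_lt _ (by norm_num)) (nEntry_lt _)) hb

lemma nWord_lt (t v : Nat) : nWord t v < 65536 := by
  unfold nWord
  rw [show (16 : Nat) = 15 + 1 from rfl, Function.iterate_succ_apply']
  exact (pstep_lt _).1

-- ---- fold-to-iterate ----
lemma foldl_const_iterate {α β : Type} (l : List α) (f : β → β) :
    ∀ s : β, l.foldl (fun p _ => f p) s = f^[l.length] s := by
  induction l with
  | nil => intro s; simp
  | cons a l ih => intro s; simp [List.foldl_cons, ih, Function.iterate_succ_apply]

lemma toNat_mod_cast16 (a : Nat) (h : a < 65536) : (((a : Nat) : Int) % 65536).toNat = a := by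
  omega

lemma nat_branch_xor (tn b : Nat) (_htn : tn < 65536) (hb : b < 2) :
    ((2 * tn + b) % 65536 ^^^ 32773) % 65536 = ((2 * tn) % 65536) ^^^ 32773 ^^^ b := by
  have heven : (2 * tn) % 65536 % 2 = 0 := by omega
  have hX : (2 * tn + b) % 65536 = (2 * tn) % 65536 ^^^ b := by
    interval_cases b
    · simp
    · rw [Nat.xor_one_of_even (Nat.even_iff.mpr heven)]; omega
  rw [Nat.mod_eq_of_lt (xlt16 (Nat.mod_lt _ (by norm_num)) (by norm_num)), hX]
  simp [Nat.xor_comm, Nat.xor_left_comm]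

lemma nat_branch_plain (tn b : Nat) (_htn : tn < 65536) (hb : b < 2) :
    (2 * tn + b) % 65536 = ((2 * tn) % 65536) ^^^ 0 ^^^ b := by
  have heven : (2 * tn) % 65536 % 2 = 0 := by omega
  interval_cases b
  · simp
  · simp only [Nat.xor_zero]
    rw [Nat.xor_one_of_even (Nat.even_iff.mpr heven)]; omega

-- ---- A-side: Int step = Nat step on the mod-2^16 residues ----
lemma crcStep_eq_pstep (t v : Int) :
    crcStep (t, v) =
      (((pstep ((t % 65536).toNat, (v % 65536).toNat)).1 : Int),
       ((pstep ((t % 65536).toNat, (v % 65536).toNat)).2 : Int)) := by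
  have htn : (t % 65536).toNat < 65536 := by omega
  have hvn : (v % 65536).toNat < 65536 := by omega
  have htb := testBit15_iff _ htn
  have hvb := testBit15_iff _ hvn
  have hT := band_bit15 t
  have hV := band_bit15 v
  have hc : ((32773 : Int)) = (((32773 : Nat) : Int)) := rfl
  simp only [crcStep, pstep, lstep, show (1 <<< 15 : Nat) = 32768 from rfl, Nat.cast_ofNat]
  by_cases h1 : 32768 ≤ t % 65536 <;> by_cases h2 : 32768 ≤ v % 65536
  · rw [if_pos (hT.mpr h1), if_pos (hV.mpr h2), if_pos (htb.mpr (by omega)),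
      if_pos (hvb.mpr (by omega))]
    rw [Prod.mk.injEq]
    constructor
    · rw [PySem.Int.mod_eq_emod_of_pos (by norm_num), hc, bxor_mod16 _ _ (by norm_num),
        show ((t * 2 + 1) % 65536).toNat = (2 * (t % 65536).toNat + 1) % 65536 from by omega]
      exact_mod_cast congrArg (Nat.cast : Nat → Int) (nat_branch_xor _ 1 htn (by norm_num))
    · rw [PySem.Int.mod_eq_emod_of_pos (by norm_num)]; omega
  · rw [if_pos (hT.mpr h1), if_neg (fun hh => h2 (hV.mp hh)), if_pos (htb.mpr (by omega)),
      if_neg (fun hh => h2 (by have := hvb.mp hh; omega))]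
    rw [Prod.mk.injEq]
    constructor
    · rw [PySem.Int.mod_eq_emod_of_pos (by norm_num), hc, bxor_mod16 _ _ (by norm_num),
        show ((t * 2) % 65536).toNat = (2 * (t % 65536).toNat + 0) % 65536 from by omega]
      norm_cast
      have h := nat_branch_xor ((t % 65536).toNat) 0 htn (by norm_num)
      exact_mod_cast congrArg (Nat.cast : Nat → Int) (by simpa using h)
    · rw [PySem.Int.mod_eq_emod_of_pos (by norm_num)]; omega
  · rw [if_neg (fun hh => h1 (hT.mp hh)), if_pos (hV.mpr h2),
      if_neg (fun hh => h1 (by have := htb.mp hh; omega)), if_pos (hvb.mpr (by omega))]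
    rw [Prod.mk.injEq]
    constructor
    · rw [PySem.Int.mod_eq_emod_of_pos (by norm_num),
        ← nat_branch_plain ((t % 65536).toNat) 1 htn (by norm_num)]
      omega
    · rw [PySem.Int.mod_eq_emod_of_pos (by norm_num)]; omega
  · rw [if_neg (fun hh => h1 (hT.mp hh)), if_neg (fun hh => h2 (hV.mp hh)),
      if_neg (fun hh => h1 (by have := htb.mp hh; omega)),
      if_neg (fun hh => h2 (by have := hvb.mp hh; omega))]
    rw [Prod.mk.injEq]
    constructor
    · rw [PySem.Int.mod_eq_emod_of_pos (by norm_num),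
        ← nat_branch_plain ((t % 65536).toNat) 0 htn (by norm_num)]
      omega
    · rw [PySem.Int.mod_eq_emod_of_pos (by norm_num)]; omega

lemma crcStep_iterate (k : Nat) : ∀ t v : Int,
    crcStep^[k + 1] (t, v) =
      (((pstep^[k + 1] ((t % 65536).toNat, (v % 65536).toNat)).1 : Int),
       ((pstep^[k + 1] ((t % 65536).toNat, (v % 65536).toNat)).2 : Int)) := by
  induction k with
  | zero =>
    intro t v
    simpa [Function.iterate_one] using crcStep_eq_pstep t v
  | succ k ih =>
    intro t v
    rw [Function.iterate_succ_apply, crcStep_eq_pstep t v, ih]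
    have hp := pstep_lt ((t % 65536).toNat, (v % 65536).toNat)
    have ha : (((pstep ((t % 65536).toNat, (v % 65536).toNat)).1 : Int) % 65536).toNat
        = (pstep ((t % 65536).toNat, (v % 65536).toNat)).1 := by omega
    have hb : (((pstep ((t % 65536).toNat, (v % 65536).toNat)).2 : Int) % 65536).toNat
        = (pstep ((t % 65536).toNat, (v % 65536).toNat)).2 := by omega
    rw [ha, hb, Prod.mk.eta, ← Function.iterate_succ_apply]

lemma intWord_eq (t v : Int) :
    ((PySem.List.pyRange 0 16 1).foldl (fun s _ => crcStep s) (t, v)).1 =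
      ((nWord (t % 65536).toNat (v % 65536).toNat : Nat) : Int) := by
  rw [foldl_const_iterate, show (PySem.List.pyRange 0 16 1).length = 16 from rfl,
    show (16 : Nat) = 15 + 1 from rfl, crcStep_iterate]
  rfl

lemma computeCRC53_eq_natA (u0 u1 u2 u3 u4 : Int) :
    computeCRC53 u0 u1 u2 u3 u4 =
      ((natA (u0 % 65536).toNat (u1 % 65536).toNat (u2 % 65536).toNat
             (u3 % 65536).toNat (u4 % 65536).toNat : Nat) : Int) := by
  unfold computeCRC53 natA
  simp only [List.foldl_cons, List.foldl_nil]
  rw [intWord_eq, intWord_eq, intWord_eq, intWord_eq, intWord_eq,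
    toNat_mod_cast16 _ (nWord_lt _ _), toNat_mod_cast16 _ (nWord_lt _ _),
    toNat_mod_cast16 _ (nWord_lt _ _), toNat_mod_cast16 _ (nWord_lt _ _),
    show (((0 : Int)) % 65536).toNat = 0 from rfl]

-- ---- B-side: Int port = Nat model ----
lemma bnstep_eq_lstep (c : Nat) : bnstep c = lstep c 0 := by
  unfold bnstep lstep
  have hand := Nat.and_two_pow c 15
  rw [show (2 : Nat) ^ 15 = 32768 from by norm_num] at hand
  cases h : c.testBit 15
  · rw [if_neg (by simp [hand, h]), if_neg (by simp)]
    rw [mask16, Nat.shiftLeft_eq, pow_one, Nat.mul_comm]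
    simp
  · rw [if_pos (by simp [hand, h]), if_pos rfl]
    rw [mask16, xmod16 _ _ (by norm_num), Nat.shiftLeft_eq, pow_one, Nat.mul_comm]
    simp

lemma iterate_cast (g : Int → Int) (f : Nat → Nat) (hgf : ∀ c, g ((c : Nat) : Int) = ((f c : Nat) : Int)) :
    ∀ (n : Nat) (c : Nat), g^[n] ((c : Nat) : Int) = ((f^[n] c : Nat) : Int) := by
  intro n
  induction n with
  | zero => intro c; simp
  | succ n ih =>
    intro c
    rw [Function.iterate_succ_apply, Function.iterate_succ_apply, hgf, ih]

lemma intTableStep_cast (c : Nat) :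
    (if PySem.Int.band ((c : Nat) : Int) 0x8000 ≠ 0 then
        PySem.Int.band (PySem.Int.bxor (((c : Nat) : Int) <<< (1 : Nat)) 0x8005) 0xFFFF
      else
        PySem.Int.band (((c : Nat) : Int) <<< (1 : Nat)) 0xFFFF) = ((bnstep c : Nat) : Int) := by
  rw [← Int.natCast_shiftLeft,
    show (32768 : Int) = ((32768 : Nat) : Int) from rfl,
    show (32773 : Int) = ((32773 : Nat) : Int) from rfl,
    show (65535 : Int) = ((65535 : Nat) : Int) from rfl,
    PySem.Int.band_natCast, PySem.Int.bxor_natCast, PySem.Int.band_natCast,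
    PySem.Int.band_natCast]
  unfold bnstep
  by_cases h : c &&& 32768 = 0 <;> simp only [h, if_true, if_false, ite_not] <;> split <;> simp_all

lemma crc16Table_get (k : Nat) (hk : k < 256) :
    PySem.List.pyGetD crc16Table (k : Int) 0 = ((nEntry k : Nat) : Int) := by
  unfold crc16Table
  rw [PySem.List.foldl_append_singleton_eq_map, List.nil_append,
    show (256 : Int) = ((256 : Nat) : Int) from rfl,
    PySem.List.pyGetD_map_pyRange _ 256 k 0 hk,
    foldl_const_iterate, show (PySem.List.pyRange 0 8 1).length = 8 from rfl,
    ← Int.natCast_shiftLeft]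
  have hstep : ∀ c : Nat,
      (fun (x : Int) =>
        if PySem.Int.band x 0x8000 ≠ 0 then
          PySem.Int.band (PySem.Int.bxor (x <<< (1 : Nat)) 0x8005) 0xFFFF
        else
          PySem.Int.band (x <<< (1 : Nat)) 0xFFFF) ((c : Nat) : Int) = ((bnstep c : Nat) : Int) :=
    fun c => intTableStep_cast c
  rw [iterate_cast _ bnstep hstep 8 (k <<< 8)]
  unfold nEntry
  rw [show bnstep = (fun c => lstep c 0) from funext bnstep_eq_lstep]

lemma intByte_eq (c b : Nat) (hc : c < 65536) :
    PySem.Int.bxor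
      (PySem.Int.bxor (PySem.Int.band (((c : Nat) : Int) <<< (8 : Nat)) 0xFFFF)
        (PySem.List.pyGetD crc16Table ((((c : Nat) : Int)) >>> (8 : Nat)) 0))
      ((b : Nat) : Int) = ((nByte c b : Nat) : Int) := by
  have h8 : c >>> 8 < 256 := by rw [Nat.shiftRight_eq_div_pow]; omega
  rw [← Int.natCast_shiftLeft, ← Int.natCast_shiftRight,
    show (65535 : Int) = ((65535 : Nat) : Int) from rfl,
    PySem.Int.band_natCast, crc16Table_get _ h8,
    PySem.Int.bxor_natCast, PySem.Int.bxor_natCast, mask16]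
  rfl

lemma intBWord (c : Nat) (hc : c < 65536) (v : Int) :
    PySem.Int.bxor
      (PySem.Int.bxor
        (PySem.Int.band
          ((PySem.Int.bxor
             (PySem.Int.bxor (PySem.Int.band (((c : Nat) : Int) <<< (8 : Nat)) 0xFFFF)
               (PySem.List.pyGetD crc16Table (((c : Nat) : Int) >>> (8 : Nat)) 0))
             (PySem.Int.band v 0xFFFF >>> (8 : Nat))) <<< (8 : Nat)) 0xFFFF)
        (PySem.List.pyGetD crc16Table
          ((PySem.Int.bxor
             (PySem.Int.bxor (PySem.Int.band (((c : Nat) : Int) <<< (8 : Nat)) 0xFFFF)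
               (PySem.List.pyGetD crc16Table (((c : Nat) : Int) >>> (8 : Nat)) 0))
             (PySem.Int.band v 0xFFFF >>> (8 : Nat))) >>> (8 : Nat)) 0))
      (PySem.Int.band (PySem.Int.band v 0xFFFF) 0xFF)
    = ((nByte (nByte c ((v % 65536).toNat >>> 8)) ((v % 65536).toNat &&& 255) : Nat) : Int) := by
  have hvn : (v % 65536).toNat < 65536 := by omega
  have hb1 : (v % 65536).toNat >>> 8 < 65536 := by rw [Nat.shiftRight_eq_div_pow]; omega
  have hb2 : (v % 65536).toNat &&& 255 < 65536 := by rw [mask8]; omega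
  rw [band_mask16 v,
    show (((v % 65536).toNat : Nat) : Int) >>> (8 : Nat)
        = ((((v % 65536).toNat >>> 8 : Nat) : Nat) : Int) from (Int.natCast_shiftRight _ _).symm,
    show (255 : Int) = ((255 : Nat) : Int) from rfl, PySem.Int.band_natCast,
    intByte_eq c _ hc, intByte_eq _ _ (nByte_lt _ _ hb1)]

lemma computeCRC53_alt_eq_natB (u0 u1 u2 u3 u4 : Int) :
    computeCRC53_alt u0 u1 u2 u3 u4 =
      ((natB (u0 % 65536).toNat (u1 % 65536).toNat (u2 % 65536).toNat
             (u3 % 65536).toNat (u4 % 65536).toNat : Nat) : Int) := by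
  unfold computeCRC53_alt natB
  simp only [List.foldl_cons, List.foldl_nil]
  rw [band_mask16 u0, intBWord _ (by omega) u1,
    intBWord _ (nByte_lt _ _ (by rw [mask8]; omega)) u2,
    intBWord _ (nByte_lt _ _ (by rw [mask8]; omega)) u3,
    intBWord _ (nByte_lt _ _ (by rw [mask8]; omega)) u4,
    intBWord _ (nByte_lt _ _ (by rw [mask8]; omega)) 0]
  norm_num

-- ---- GF(2) linearity of the bit-step ----
lemma double_mod_xor (x y : Nat) : (2 * (x ^^^ y)) % 65536 = (2 * x) % 65536 ^^^ (2 * y) % 65536 := by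
  simp only [show ∀ z : Nat, 2 * z = z <<< 1 from fun z => by
    rw [Nat.shiftLeft_eq, pow_one, Nat.mul_comm]]
  rw [Nat.shiftLeft_xor_distrib, ← mask16, ← mask16, ← mask16, Nat.and_xor_distrib_right]

lemma lstep_xor (t1 t2 b1 b2 : Nat) :
    lstep (t1 ^^^ t2) (b1 ^^^ b2) = lstep t1 b1 ^^^ lstep t2 b2 := by
  unfold lstep
  rw [double_mod_xor, Nat.testBit_xor]
  cases h1 : t1.testBit 15 <;> cases h2 : t2.testBit 15 <;>
    simp [Nat.xor_assoc, Nat.xor_comm, Nat.xor_left_comm]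

lemma pstep_xor (s1 s2 : Nat × Nat) :
    pstep (s1.1 ^^^ s2.1, s1.2 ^^^ s2.2) =
      ((pstep s1).1 ^^^ (pstep s2).1, (pstep s1).2 ^^^ (pstep s2).2) := by
  unfold pstep
  rw [Prod.mk.injEq]
  constructor
  · rw [show (if (s1.2 ^^^ s2.2).testBit 15 then 1 else 0)
        = ((if s1.2.testBit 15 then 1 else 0) ^^^ (if s2.2.testBit 15 then 1 else 0) : Nat) from by
      rw [Nat.testBit_xor]
      cases h1 : s1.2.testBit 15 <;> cases h2 : s2.2.testBit 15 <;> simp]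
    exact lstep_xor _ _ _ _
  · exact double_mod_xor _ _

lemma pstep_iterate_xor (k : Nat) : ∀ s1 s2 : Nat × Nat,
    pstep^[k] (s1.1 ^^^ s2.1, s1.2 ^^^ s2.2) =
      ((pstep^[k] s1).1 ^^^ (pstep^[k] s2).1, (pstep^[k] s1).2 ^^^ (pstep^[k] s2).2) := by
  induction k with
  | zero => intro s1 s2; simp
  | succ k ih =>
    intro s1 s2
    rw [Function.iterate_succ_apply, pstep_xor, ih (pstep s1) (pstep s2),
      ← Function.iterate_succ_apply, ← Function.iterate_succ_apply]

-- ---- the three special 8-step evaluations ----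
lemma pstep_iterate_v0 (k : Nat) : ∀ t : Nat, pstep^[k] (t, 0) = ((fun c => lstep c 0)^[k] t, 0) := by
  induction k with
  | zero => intro t; simp
  | succ k ih =>
    intro t
    rw [Function.iterate_succ_apply, Function.iterate_succ_apply,
      show pstep (t, 0) = (lstep t 0, 0) from by unfold pstep; simp [Nat.zero_testBit], ih]

lemma lstep_iterate_low (k : Nat) (hk : k ≤ 8) (lo : Nat) (hlo : lo < 256) :
    (fun c => lstep c 0)^[k] lo = lo <<< k := by
  induction k with
  | zero => simp
  | succ k ih =>
    rw [Function.iterate_succ_apply', ih (by omega)]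
    have h2 : (2 : Nat) ^ k ≤ 128 := by
      calc (2 : Nat) ^ k ≤ 2 ^ 7 := Nat.pow_le_pow_right (by norm_num) (by omega)
        _ = 128 := by norm_num
    have hb : lo <<< k < 32768 := by
      rw [Nat.shiftLeft_eq]
      calc lo * 2 ^ k ≤ 255 * 128 := Nat.mul_le_mul (by omega) h2
        _ < 32768 := by norm_num
    unfold lstep
    rw [Nat.testBit_lt_two_pow (x := lo <<< k) (i := 15) (by norm_num; omega)]
    simp only [Bool.false_eq_true, if_false, Nat.xor_zero]
    rw [Nat.mod_eq_of_lt (by omega)]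
    rw [Nat.shiftLeft_eq, Nat.shiftLeft_eq, pow_succ]
    ring

lemma pstep8_table (hi : Nat) : pstep^[8] (hi <<< 8, 0) = (nEntry hi, 0) := by
  rw [pstep_iterate_v0]
  rfl

lemma pstep8_low (lo : Nat) (hlo : lo < 256) : pstep^[8] (lo, 0) = (lo <<< 8, 0) := by
  rw [pstep_iterate_v0, lstep_iterate_low 8 le_rfl lo hlo]

lemma pstep_iterate_feed (k : Nat) (hk : k ≤ 8) (v : Nat) (hv : v < 65536) :
    pstep^[k] (0, v) = (v >>> (16 - k), (v <<< k) % 65536) := by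
  induction k with
  | zero =>
    rw [Function.iterate_zero_apply, Nat.shiftLeft_zero, Nat.mod_eq_of_lt hv,
      show (16 : Nat) - 0 = 16 from rfl,
      show v >>> 16 = 0 from by rw [Nat.shiftRight_eq_div_pow]; exact Nat.div_eq_of_lt (by omega)]
  | succ k ih =>
    rw [Function.iterate_succ_apply', ih (by omega)]
    have hk7 : k ≤ 7 := by omega
    -- the bit fed at this step
    have hbit : ((v <<< k) % 65536).testBit 15 = v.testBit (15 - k) := by
      rw [show (65536 : Nat) = 2 ^ 16 from by norm_num, Nat.testBit_mod_two_pow,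
        Nat.testBit_shiftLeft]
      simp [show (15 : Nat) ≥ k from by omega]
    -- the register is small, so no xor fires
    have hreg : v >>> (16 - k) < 128 := by
      rw [Nat.shiftRight_eq_div_pow]
      have h9 : (2 : Nat) ^ 9 ≤ 2 ^ (16 - k) := Nat.pow_le_pow_right (by norm_num) (by omega)
      have := Nat.div_le_div_left h9 (by norm_num) (a := v)
      have hv9 : v / 2 ^ 9 < 128 := by norm_num; omega
      omega
    unfold pstep lstep
    rw [Prod.mk.injEq]
    constructor
    · rw [hbit, Nat.testBit_lt_two_pow (x := v >>> (16 - k)) (i := 15) (by omega)]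
      simp only [Bool.false_eq_true, if_false, Nat.xor_zero]
      rw [Nat.mod_eq_of_lt (by omega)]
      -- arithmetic: 2 * (v / 2^(16-k)) plus the next bit is v / 2^(15-k)
      rw [Nat.shiftRight_eq_div_pow, Nat.shiftRight_eq_div_pow,
        Nat.testBit_eq_decide_div_mod_eq,
        show (16 : Nat) - k = (15 - k) + 1 from by omega, pow_succ,
        show v / (2 ^ (15 - k) * 2) = v / 2 ^ (15 - k) / 2 from by
          rw [Nat.div_div_eq_div_mul],
        show (16 : Nat) - (k + 1) = 15 - k from by omega]
      rcases Nat.mod_two_eq_zero_or_one (v / 2 ^ (15 - k)) with h | h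
      · rw [if_neg (by simp [h]), Nat.xor_zero]
        omega
      · rw [if_pos (by simp [h]), Nat.xor_one_of_even (Nat.even_iff.mpr (by omega))]
        omega
    · rw [show (2 * ((v <<< k) % 65536)) % 65536 = (2 * (v <<< k)) % 65536 from by omega,
        show 2 * (v <<< k) = v <<< (k + 1) from by
          rw [Nat.shiftLeft_eq, Nat.shiftLeft_eq, pow_succ]; ring]

-- ---- per-byte and per-word equivalence ----
lemma key8 (t v : Nat) (_ht : t < 65536) (hv : v < 65536) :
    pstep^[8] (t, v) = (nByte t (v >>> 8), (v <<< 8) % 65536) := by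
  have hlo : t &&& 255 < 256 := by rw [mask8]; omega
  have hsplit : (t >>> 8) <<< 8 ^^^ (t &&& 255) = t := by
    have h := xor_low_pow 8 (t >>> 8) (t &&& 255) (by rw [mask8]; omega)
    rw [Nat.shiftLeft_eq, h, Nat.shiftRight_eq_div_pow, mask8]
    norm_num
    omega
  have hx : pstep^[8] (t, v)
      = ((pstep^[8] (t, 0)).1 ^^^ (pstep^[8] (0, v)).1,
         (pstep^[8] (t, 0)).2 ^^^ (pstep^[8] (0, v)).2) := by
    have h := pstep_iterate_xor 8 (t, 0) (0, v)
    simpa using h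
  have hy : pstep^[8] (t, 0) = (nEntry (t >>> 8) ^^^ (t &&& 255) <<< 8, 0) := by
    have h := pstep_iterate_xor 8 ((t >>> 8) <<< 8, 0) (t &&& 255, 0)
    rw [pstep8_table, pstep8_low _ hlo] at h
    simpa [hsplit] using h
  rw [hx, hy, pstep_iterate_feed 8 le_rfl v hv]
  unfold nByte
  rw [Prod.mk.injEq]
  constructor
  · rw [show (t &&& 255) <<< 8 = (t <<< 8) % 65536 from by
      rw [mask8, Nat.shiftLeft_eq, Nat.shiftLeft_eq]; norm_num; omega]
    simp [Nat.xor_comm, Nat.xor_left_comm]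
  · simp

lemma word_eq_bytes (t v : Nat) (ht : t < 65536) (hv : v < 65536) :
    nWord t v = nByte (nByte t (v >>> 8)) (v &&& 255) := by
  have hb1 : v >>> 8 < 65536 := by rw [Nat.shiftRight_eq_div_pow]; omega
  unfold nWord
  rw [show (16 : Nat) = 8 + 8 from rfl, Function.iterate_add_apply, key8 t v ht hv,
    key8 _ _ (nByte_lt _ _ hb1) (Nat.mod_lt _ (by norm_num)),
    show ((v <<< 8) % 65536) >>> 8 = v &&& 255 from by
      rw [mask8, Nat.shiftLeft_eq, Nat.shiftRight_eq_div_pow]; norm_num; omega]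

lemma natA_eq_natB (r0 r1 r2 r3 r4 : Nat) (h0 : r0 < 65536) (h1 : r1 < 65536)
    (h2 : r2 < 65536) (h3 : r3 < 65536) (h4 : r4 < 65536) :
    natA r0 r1 r2 r3 r4 = natB r0 r1 r2 r3 r4 := by
  unfold natA natB
  simp only [List.foldl_cons, List.foldl_nil]
  rw [word_eq_bytes r0 r1 h0 h1,
    word_eq_bytes _ r2 (nByte_lt _ _ (by rw [mask8]; omega)) h2,
    word_eq_bytes _ r3 (nByte_lt _ _ (by rw [mask8]; omega)) h3,
    word_eq_bytes _ r4 (nByte_lt _ _ (by rw [mask8]; omega)) h4,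
    word_eq_bytes _ 0 (nByte_lt _ _ (by rw [mask8]; omega)) (by norm_num)]

-- ===== VERDICT (by name: the statement is the Claim_ definition above) =====
theorem computeCRC53_spec : Claim_equal_computeCRC53 := by
  intro u0 u1 u2 u3 u4 _
  unfold Spec_computeCRC53
  rw [computeCRC53_eq_natA, computeCRC53_alt_eq_natB,
    natA_eq_natB _ _ _ _ _ (by omega) (by omega) (by omega) (by omega) (by omega)]
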